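-- pv_equiv track=rewrite | github.com/alexpan00/isoseq-prep | scripts/inspect_adapters.py | build_color_map
-- ===== SOURCE A (Python) =====
-- from typing import Dict, Iterable, List, Sequence, Tuple, Optional
--
-- Annotation = Tuple[int, int, str, int, str]
--
-- def build_color_map(length: int, annotations: Sequence[Annotation]) -> List[str | None]:
--     color_priority: List[Tuple[str | None, int]] = [[None, 0] for _ in range(length)]  # type: ignore
--     for start, end, color, priority, _ in annotations:
--         clamped_start = max(0, start)
--         clamped_end = min(length, end)
--         for idx in range(clamped_start, clamped_end):
--             if priority >= color_priority[idx][1]: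
--                 color_priority[idx] = [color, priority]
--     return [entry[0] for entry in color_priority]
-- ===== SOURCE B (Python) =====
-- def build_color_map(length, annotations):
--     # Cell-major: for each position, fold once over the annotations and keep
--     # the best (priority, later-wins) color; no mutable array, no clamping.
--     def best(i):
--         color, pri = None, 0
--         for start, end, c, p, _ in annotations:
--             if start <= i < end and p >= pri:
--                 color, pri = c, p
--         return color
--     return [best(i) for i in range(length)]
-- ===== Notes on version B (the rewrite author's own statement) =====
-- stated objective: alternative
-- what changed: A paints annotation-major into a mutable array with clamped index ranges; B computes each cell independently with a single fold over the annotations (cell-major traversal, no mutation, no clamping).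
import Mathlib
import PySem

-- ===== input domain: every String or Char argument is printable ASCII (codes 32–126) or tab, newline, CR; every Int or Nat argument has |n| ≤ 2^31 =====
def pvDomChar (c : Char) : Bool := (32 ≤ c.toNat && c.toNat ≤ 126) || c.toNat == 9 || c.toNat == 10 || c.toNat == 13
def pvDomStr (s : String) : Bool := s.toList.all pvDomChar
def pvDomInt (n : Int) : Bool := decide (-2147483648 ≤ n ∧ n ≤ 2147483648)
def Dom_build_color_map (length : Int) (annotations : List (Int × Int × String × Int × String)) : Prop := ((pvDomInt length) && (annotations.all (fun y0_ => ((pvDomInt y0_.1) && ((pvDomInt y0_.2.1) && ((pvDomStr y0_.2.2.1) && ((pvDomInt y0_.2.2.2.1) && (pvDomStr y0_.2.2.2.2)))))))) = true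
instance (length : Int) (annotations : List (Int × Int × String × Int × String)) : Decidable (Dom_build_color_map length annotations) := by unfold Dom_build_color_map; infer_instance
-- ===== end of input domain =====

-- ===== PORT A =====
-- B changes the traversal: A paints annotation-major into a mutable array with clamped
-- ranges; B computes each cell independently by one fold over the annotations (objective: alternative).
-- `color_priority[idx]` / `color_priority[idx] = …` ported with pyGetD/pySetD (idx is always
-- in range here because the loop bounds are clamped to [0, length)).
def pvPaintIdx (color : String) (priority : Int)
    (cp : List (Option String × Int)) (idx : Int) : List (Option String × Int) :=
  if priority ≥ (PySem.List.pyGetD cp idx ((none : Option String), (0 : Int))).2 then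
    PySem.List.pySetD cp idx ((some color), priority)
  else cp

def pvPaintAnn (length : Int) (cp : List (Option String × Int))
    (a : Int × Int × String × Int × String) : List (Option String × Int) :=
  let clamped_start := max 0 a.1
  let clamped_end := min length a.2.1
  (PySem.List.pyRange clamped_start clamped_end 1).foldl (pvPaintIdx a.2.2.1 a.2.2.2.1) cp

def build_color_map (length : Int) (annotations : List (Int × Int × String × Int × String)) : List (Option String) :=
  let init := (PySem.List.pyRange 0 length 1).map (fun _ => ((none : Option String), (0 : Int)))
  ((annotations.foldl (pvPaintAnn length) init)).map Prod.fst

-- ===== PORT B =====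
def pvBestStep (i : Int) (acc : Option String × Int)
    (a : Int × Int × String × Int × String) : Option String × Int :=
  if a.1 ≤ i ∧ i < a.2.1 ∧ a.2.2.2.1 ≥ acc.2 then (some a.2.2.1, a.2.2.2.1) else acc

def pvBest (annotations : List (Int × Int × String × Int × String)) (i : Int) : Option String × Int :=
  annotations.foldl (pvBestStep i) ((none : Option String), (0 : Int))

def build_color_map_alt (length : Int) (annotations : List (Int × Int × String × Int × String)) : List (Option String) :=
  (PySem.List.pyRange 0 length 1).map (fun i => (pvBest annotations i).1)

-- ===== PRECONDITION & SPEC =====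
def Spec_build_color_map (length : Int) (annotations : List (Int × Int × String × Int × String)) (out : List (Option String)) : Prop := out = build_color_map_alt length annotations
instance (length : Int) (annotations : List (Int × Int × String × Int × String)) (out : List (Option String)) : Decidable (Spec_build_color_map length annotations out) := by unfold Spec_build_color_map; infer_instance

-- ===== CLAIM (what is proved, stated in full; the proofs are below) =====
def Claim_equal_build_color_map : Prop := ∀ (length : Int) (annotations : List (Int × Int × String × Int × String)), Dom_build_color_map length annotations → Spec_build_color_map length annotations (build_color_map length annotations)

-- ===== LEMMAS AND PROOFS =====

-- the pointwise effect of one conditional paint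
def pvUpd (color : String) (priority : Int) (x : Option String × Int) : Option String × Int :=
  if priority ≥ x.2 then (some color, priority) else x

theorem pvPaintIdx_length (c : String) (p : Int) (cp : List (Option String × Int)) (idx : Int) :
    (pvPaintIdx c p cp idx).length = cp.length := by
  unfold pvPaintIdx
  split <;> simp [PySem.List.length_pySetD]

theorem pvPaintIdx_getElem? (c : String) (p : Int) (cp : List (Option String × Int)) (idx : Int)
    (h0 : 0 ≤ idx) (h1 : idx < (cp.length : Int)) (j : Nat) :
    (pvPaintIdx c p cp idx)[j]? =
      if (j : Int) = idx then cp[j]?.map (pvUpd c p) else cp[j]? := by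
  have hlt : idx.toNat < cp.length := by omega
  unfold pvPaintIdx
  rw [PySem.List.pyGetD_eq_getElem cp ((none : Option String), (0 : Int)) h0 h1,
    PySem.List.pySetD_of_nonneg cp ((some c), p) h0]
  by_cases hj : (j : Int) = idx
  · have hjn : j = idx.toNat := by omega
    subst hjn
    have hget : cp[idx.toNat]? = some cp[idx.toNat] := List.getElem?_eq_getElem hlt
    by_cases hp : p ≥ cp[idx.toNat].2
    · simp [hp, hj, hlt, pvUpd]
    · simp [hp, hj, hget, pvUpd]
  · have hjn : j ≠ idx.toNat := by omega
    by_cases hp : p ≥ cp[idx.toNat].2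
    · have hjn' : idx.toNat ≠ j := Ne.symm hjn
      simp [hp, hj, hjn']
    · simp [hp, hj]

theorem pvInner (c : String) (p : Int) :
    ∀ (n : Nat) (cs ce : Int) (cp : List (Option String × Int)), 0 ≤ cs → ce ≤ (cp.length : Int) →
    (ce - cs).toNat = n →
    ((PySem.List.pyRange cs ce 1).foldl (pvPaintIdx c p) cp).length = cp.length ∧
    ∀ j : Nat, ((PySem.List.pyRange cs ce 1).foldl (pvPaintIdx c p) cp)[j]? =
      if cs ≤ (j : Int) ∧ (j : Int) < ce then cp[j]?.map (pvUpd c p) else cp[j]? := by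
  intro n
  induction n with
  | zero =>
    intro cs ce cp hcs hce hn
    have hnil : PySem.List.pyRange cs ce 1 = [] := PySem.List.pyRange_one_eq_nil (by omega)
    rw [hnil]
    refine ⟨rfl, fun j => ?_⟩
    have : ¬ (cs ≤ (j : Int) ∧ (j : Int) < ce) := by omega
    simp [this]
  | succ n ih =>
    intro cs ce cp hcs hce hn
    have hlt : cs < ce := by omega
    rw [PySem.List.pyRange_one_cons hlt]
    simp only [List.foldl_cons]
    have hlen' : (pvPaintIdx c p cp cs).length = cp.length := pvPaintIdx_length c p cp cs
    have hcs' : (0 : Int) ≤ cs + 1 := by omega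
    have hce' : ce ≤ ((pvPaintIdx c p cp cs).length : Int) := by rw [hlen']; exact hce
    obtain ⟨ihlen, ihget⟩ := ih (cs + 1) ce (pvPaintIdx c p cp cs) hcs' hce' (by omega)
    refine ⟨by rw [ihlen, hlen'], fun j => ?_⟩
    rw [ihget j, pvPaintIdx_getElem? c p cp cs hcs (by omega) j]
    by_cases hj : (j : Int) = cs
    · have ha : ¬ (cs + 1 ≤ (j : Int) ∧ (j : Int) < ce) := by omega
      have hb : cs ≤ (j : Int) ∧ (j : Int) < ce := by omega
      rw [if_neg ha, if_pos hj, if_pos hb]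
    · rw [if_neg hj]
      have h : (cs + 1 ≤ (j : Int) ∧ (j : Int) < ce) ↔ (cs ≤ (j : Int) ∧ (j : Int) < ce) := by omega
      simp only [h]

theorem pvPaintMap (L : Int) (g : Int → Option String × Int)
    (a : Int × Int × String × Int × String) :
    pvPaintAnn L ((PySem.List.pyRange 0 L 1).map g) a
      = (PySem.List.pyRange 0 L 1).map (fun i => pvBestStep i (g i) a) := by
  have hlen : ((PySem.List.pyRange 0 L 1).map g).length = (L - 0).toNat := by
    rw [List.length_map, PySem.List.length_pyRange_one]
  obtain ⟨hl, hg⟩ := pvInner a.2.2.1 a.2.2.2.1 ((min L a.2.1 - max 0 a.1)).toNat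
    (max 0 a.1) (min L a.2.1) ((PySem.List.pyRange 0 L 1).map g)
    (le_max_left 0 a.1) (by omega) rfl
  apply List.ext_getElem?
  intro j
  show ((PySem.List.pyRange (max 0 a.1) (min L a.2.1) 1).foldl
      (pvPaintIdx a.2.2.1 a.2.2.2.1) ((PySem.List.pyRange 0 L 1).map g))[j]? = _
  rw [hg j]
  simp only [List.getElem?_map, PySem.List.getElem?_pyRange_one]
  by_cases hjL : j < (L - 0).toNat
  · rw [if_pos hjL]
    simp only [Option.map_some]
    by_cases hc : a.1 ≤ (j : Int) ∧ (j : Int) < a.2.1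
    · have hc' : max 0 a.1 ≤ (j : Int) ∧ (j : Int) < min L a.2.1 := by omega
      rw [if_pos hc']
      simp [pvBestStep, pvUpd, hc.1, hc.2]
    · have hc' : ¬ (max 0 a.1 ≤ (j : Int) ∧ (j : Int) < min L a.2.1) := by omega
      rw [if_neg hc']
      rcases not_and_or.mp hc with h | h
      · simp [pvBestStep, h]
      · simp [pvBestStep, h]
  · rw [if_neg hjL]
    simp only [Option.map_none]
    split <;> rfl

theorem pvBest_append (anns : List (Int × Int × String × Int × String))
    (a : Int × Int × String × Int × String) (i : Int) :
    pvBest (anns ++ [a]) i = pvBestStep i (pvBest anns i) a := by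
  unfold pvBest
  rw [List.foldl_append]
  rfl

theorem pvState (L : Int) (anns : List (Int × Int × String × Int × String)) :
    anns.foldl (pvPaintAnn L)
      ((PySem.List.pyRange 0 L 1).map (fun _ => ((none : Option String), (0 : Int))))
    = (PySem.List.pyRange 0 L 1).map (pvBest anns) := by
  induction anns using List.reverseRecOn with
  | nil => rfl
  | append_singleton anns a ih =>
    rw [List.foldl_append, List.foldl_cons, List.foldl_nil, ih, pvPaintMap]
    exact List.map_congr_left (fun i _ => (pvBest_append anns a i).symm)

theorem build_color_map_eq (L : Int) (anns : List (Int × Int × String × Int × String)) :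
    build_color_map L anns = build_color_map_alt L anns := by
  show List.map Prod.fst
      (anns.foldl (pvPaintAnn L)
        ((PySem.List.pyRange 0 L 1).map (fun _ => ((none : Option String), (0 : Int)))))
    = build_color_map_alt L anns
  rw [pvState, List.map_map]
  rfl

-- ===== VERDICT (by name: the statement is the Claim_ definition above) =====
theorem build_color_map_spec : Claim_equal_build_color_map := by
  intro L anns _
  unfold Spec_build_color_map
  exact build_color_map_eq L anns
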